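-- pv_equiv track=rewrite | github.com/svilupp/ModernBert.jl | scripts/download_model.py | find_model_file
-- ===== SOURCE A (Python) =====
-- def find_model_file(files):
--     """Find the ONNX model file in the repository."""
--     onnx_files = [f for f in files if f.endswith('.onnx')]
--     if not onnx_files:
--         raise ValueError("No .onnx files found in repository")
--     # Prefer exact match, then first .onnx file
--     return next(
--         (f for f in onnx_files if f == 'model.onnx'),
--         onnx_files[0]
--     )
-- ===== SOURCE B (Python) =====
-- def find_model_file(files):
--     """Find the ONNX model file in the repository."""
--     if not files:
--         raise ValueError("No .onnx files found in repository")
--     # Rank every file by (is it not an .onnx file, is it not the exact name);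
--     # the minimum under this lexicographic key is the wanted file.
--     best = min(files, key=lambda f: (not f.endswith('.onnx'), f != 'model.onnx'))
--     if not best.endswith('.onnx'):
--         raise ValueError("No .onnx files found in repository")
--     return best
-- ===== Notes on version B (the rewrite author's own statement) =====
-- stated objective: alternative
-- what changed: Replaced the filter-comprehension plus second next() scan by one min() reduction over all files under a lexicographic ranking key (not-.onnx, not-'model.onnx'), whose first minimum is exactly the wanted file.
import Mathlib
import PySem

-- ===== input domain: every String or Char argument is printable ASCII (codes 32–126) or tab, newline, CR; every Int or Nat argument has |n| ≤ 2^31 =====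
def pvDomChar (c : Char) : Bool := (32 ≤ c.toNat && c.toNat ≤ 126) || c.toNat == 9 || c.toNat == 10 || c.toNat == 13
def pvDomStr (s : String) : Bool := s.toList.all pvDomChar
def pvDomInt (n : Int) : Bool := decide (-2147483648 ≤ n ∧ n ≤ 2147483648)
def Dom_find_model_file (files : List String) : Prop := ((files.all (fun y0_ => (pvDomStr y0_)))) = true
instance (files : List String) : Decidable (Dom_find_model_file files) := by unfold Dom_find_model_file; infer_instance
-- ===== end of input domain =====

-- B replaces A's filter-comprehension plus second next() scan by one min() reduction
-- under a lexicographic ranking key (alternative decomposition, same cost).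

-- ===== PORT A =====
def find_model_file (files : List String) : String :=
  let onnx_files := files.filter (fun f => PySem.Str.endswith f ".onnx")
  -- Python raises ValueError when onnx_files = []; those inputs are excluded by Pre_ (headD's "" is never reached there)
  ((onnx_files.find? (fun f => f == "model.onnx")).getD (onnx_files.headD ""))

-- ===== PORT B =====
def find_model_file_alt (files : List String) : String :=
  -- min(files, key=lambda f: (not f.endswith('.onnx'), f != 'model.onnx')); min of [] raises → "" (excluded by Pre_)
  match PySem.List.min2? files (fun f => !PySem.Str.endswith f ".onnx") (fun f => !(f == "model.onnx")) with
  | none => ""  -- Python raises ValueError here; excluded by Pre_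
  | some best =>
    if !PySem.Str.endswith best ".onnx" then ""  -- Python raises ValueError here; excluded by Pre_
    else best

-- ===== PRECONDITION & SPEC =====
-- Pre_ excludes exactly the inputs with no name ending in ".onnx", on which A raises ValueError (B raises too).
def Pre_find_model_file (files : List String) : Prop :=
  (files.any (fun f => PySem.Str.endswith f ".onnx")) = true
instance (files : List String) : Decidable (Pre_find_model_file files) := by unfold Pre_find_model_file; infer_instance
def pvWitness_find_model_file : List String := (["a.txt", "x.onnx", "model.onnx"])

def Spec_find_model_file (files : List String) (out : String) : Prop := out = find_model_file_alt files
instance (files : List String) (out : String) : Decidable (Spec_find_model_file files out) := by unfold Spec_find_model_file; infer_instance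

-- ===== CLAIM (what is proved, stated in full; the proofs are below) =====
def Claim_equal_find_model_file : Prop := ∀ (files : List String), Dom_find_model_file files → Pre_find_model_file files → Spec_find_model_file files (find_model_file files)

-- ===== LEMMAS AND PROOFS =====

-- abbreviations used only by the proofs
def pvOnnx (f : String) : Bool := PySem.Str.endswith f ".onnx"
def pvIsM (f : String) : Bool := f == "model.onnx"
def pvStep (acc : Option String) (x : String) : Option String :=
  match acc with
  | none => some x
  | some m =>
    if (decide ((!pvOnnx x) < (!pvOnnx m)) ||
        !decide ((!pvOnnx m) < (!pvOnnx x)) && decide ((!pvIsM x) < (!pvIsM m))) = true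
    then some x else some m

theorem pv_min2_eq_fold (files : List String) :
    PySem.List.min2? files (fun f => !PySem.Str.endswith f ".onnx") (fun f => !(f == "model.onnx"))
      = files.foldl pvStep none := by
  unfold PySem.List.min2?
  congr 1
  funext acc x
  unfold pvStep pvOnnx pvIsM
  cases acc <;> rfl

theorem pv_isM_onnx (f : String) (h : pvIsM f = true) : pvOnnx f = true := by
  have : f = "model.onnx" := by simpa [pvIsM] using h
  subst this; decide

theorem pv_isM_model (f : String) (h : pvIsM f = true) : f = "model.onnx" := by
  simpa [pvIsM] using h

-- once the accumulator holds an .onnx file the fold returns 'model.onnx' iff one occurs, else keeps m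
theorem pv_fold_onnx (files : List String) (m : String) (hm : pvOnnx m = true) :
    files.foldl pvStep (some m)
      = some (if pvIsM m || files.any pvIsM then "model.onnx" else m) := by
  induction files generalizing m with
  | nil =>
    by_cases h : pvIsM m = true
    · simp [pv_isM_model m h]
    · simp [h]
  | cons f rest ih =>
    rw [List.foldl_cons]
    by_cases hf : pvOnnx f = true
    · by_cases hMf : pvIsM f = true
      · by_cases hMm : pvIsM m = true
        · have : pvStep (some m) f = some m := by
            simp [pvStep, hf, hm, hMf, hMm]
          rw [this, ih m hm]; simp [hMm]
        · have : pvStep (some m) f = some f := by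
            simp [pvStep, hf, hm, hMf, hMm]
          rw [this, ih f hf]; simp [hMf]
      · have : pvStep (some m) f = some m := by
          simp [pvStep, hf, hm, hMf]
        rw [this, ih m hm]; simp [hMf]
    · have hMf : pvIsM f = false := by
        cases h : pvIsM f
        · rfl
        · exact absurd (pv_isM_onnx f h) (by simp [hf])
      have : pvStep (some m) f = some m := by
        simp [pvStep, hf, hm]
      rw [this, ih m hm]; simp [hMf]

-- before any .onnx file has been seen the accumulator just waits for the first one
theorem pv_fold_nononnx (files : List String) (m : String) (hm : pvOnnx m = false) :
    files.foldl pvStep (some m)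
      = if files.any pvOnnx then
          some (if files.any pvIsM then "model.onnx" else (files.filter pvOnnx).headD "")
        else some m := by
  induction files generalizing m with
  | nil => simp
  | cons f rest ih =>
    rw [List.foldl_cons]
    by_cases hf : pvOnnx f = true
    · have : pvStep (some m) f = some f := by simp [pvStep, hf, hm]
      rw [this, pv_fold_onnx rest f hf]
      simp [hf]
    · have hMf : pvIsM f = false := by
        cases h : pvIsM f
        · rfl
        · exact absurd (pv_isM_onnx f h) (by simp [hf])
      have : pvStep (some m) f = some m := by
        simp [pvStep, hf, hm, hMf]
      rw [this, ih m hm]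
      simp [hf, hMf]

-- A's next(...) with default: first match or the default
theorem pv_find_getD (xs : List String) (d : String) :
    (xs.find? (fun f => f == "model.onnx")).getD d
      = if xs.any pvIsM then "model.onnx" else d := by
  induction xs with
  | nil => simp
  | cons x xs ih =>
    by_cases hx : (x == "model.onnx") = true
    · have : x = "model.onnx" := by simpa using hx
      simp [this, pvIsM]
    · simp [hx, ih, pvIsM]

theorem pv_any_filter (files : List String) :
    (files.filter pvOnnx).any pvIsM = files.any pvIsM := by
  induction files with
  | nil => rfl
  | cons f rest ih =>
    by_cases hf : pvOnnx f = true
    · simp [hf, ih]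
    · have hMf : pvIsM f = false := by
        cases h : pvIsM f
        · rfl
        · exact absurd (pv_isM_onnx f h) (by simp [hf])
      simp [hf, hMf, ih]

-- ===== VERDICT (by name: the statement is the Claim_ definition above) =====
theorem find_model_file_spec : Claim_equal_find_model_file := by
  intro files _ hpre
  unfold Spec_find_model_file find_model_file find_model_file_alt
  rw [pv_min2_eq_fold]
  have hfn : (fun f => PySem.Str.endswith f ".onnx") = pvOnnx := rfl
  rw [hfn]
  unfold Pre_find_model_file at hpre
  have hany : files.any pvOnnx = true := by simpa [pvOnnx] using hpre
  rw [pv_find_getD, pv_any_filter]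
  cases files with
  | nil => simp at hany
  | cons f rest =>
    rw [List.foldl_cons]
    have hhead : ∀ (l : List String), l.any pvOnnx = true → pvOnnx ((l.filter pvOnnx).headD "") = true := by
      intro l hl
      have : (l.filter pvOnnx) ≠ [] := by
        simp only [List.any_eq_true] at hl
        obtain ⟨x, hx, hpx⟩ := hl
        intro hnil
        exact absurd hpx (by simpa using (List.filter_eq_nil_iff.mp hnil x hx))
      obtain ⟨x, xs, hx⟩ := List.exists_cons_of_ne_nil this
      have : x ∈ l.filter pvOnnx := by simp [hx]
      simpa [hx] using (List.of_mem_filter this)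
    by_cases hf : pvOnnx f = true
    · have : pvStep none f = some f := rfl
      rw [this, pv_fold_onnx rest f hf]
      by_cases hM : (pvIsM f || rest.any pvIsM) = true
      · have hM' : (f :: rest).any pvIsM = true := by simpa using hM
        simp only [hM, hM', if_pos]
        decide
      · have hMf : pvIsM f = false := by cases h : pvIsM f <;> simp [h] at hM ⊢
        have hMr : rest.any pvIsM = false := by cases h : rest.any pvIsM <;> simp [h, hMf] at hM ⊢
        have hM' : (f :: rest).any pvIsM = false := by simp [hMf, hMr]
        have hf' : PySem.Chars.endswith f.toList ['.', 'o', 'n', 'n', 'x'] = true := by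
          simpa [pvOnnx, PySem.Str.endswith] using hf
        simp [hM, hM', hf', hf]
    · have : pvStep none f = some f := rfl
      rw [this, pv_fold_nononnx rest f (by simpa using hf)]
      have hr : rest.any pvOnnx = true := by
        simpa [hf] using hany
      have hMf : pvIsM f = false := by
        cases h : pvIsM f
        · rfl
        · exact absurd (pv_isM_onnx f h) (by simp [hf])
      rw [if_pos hr]
      by_cases hM : rest.any pvIsM = true
      · have hM' : (f :: rest).any pvIsM = true := by simp [hM]
        simp only [hM, hM', if_pos]
        decide
      · have hM2 : rest.any pvIsM = false := by cases h : rest.any pvIsM <;> simp [h] at hM ⊢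
        have hM' : (f :: rest).any pvIsM = false := by simp [hMf, hM2]
        have hh := hhead rest hr
        simp only [hM2, hM', if_false, Bool.false_eq_true]
        rw [List.filter_cons_of_neg (by simpa using hf)]
        simp [pvOnnx] at hh ⊢
        simp [hh]
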